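-- pv_equiv track=rewrite | github.com/Mohaddeseh-Tabrizian/-HackerRank | Justify!/main.py | distribute_spaces
-- ===== SOURCE A (Python) =====
-- def distribute_spaces(num_spaces, positions):
--     # Adding just one space for every space position.
--     position_map = []
--     if positions == 0:
--         return [num_spaces]
--
--     k = num_spaces // positions
--
--     for i in range(0, positions):
--         position_map.append(k)
--     # Adding extra spaces.
--     extra = num_spaces % positions
--     front_pointer = 0
--     back_pointer = positions - 1
--     flag_front_turn = False
--
--     for j in range(0, extra):
--         if flag_front_turn:
--             position_map[front_pointer] = k + 1
--             front_pointer += 1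
--             flag_front_turn = False
--         else:
--             position_map[back_pointer] = k + 1
--             back_pointer -= 1
--             flag_front_turn = True
--
--     return position_map
-- ===== SOURCE B (Python) =====
-- def distribute_spaces(num_spaces, positions):
--     # Closed-form split: extras alternate back-first, so the back gets
--     # ceil(extra/2) slots and the front gets floor(extra/2) slots.
--     if positions == 0:
--         return [num_spaces]
--     k, extra = divmod(num_spaces, positions)
--     num_front = extra // 2
--     num_back = (extra + 1) // 2
--     return [k + 1 if i < num_front or i >= positions - num_back else k
--             for i in range(positions)]
-- ===== Notes on version B (the rewrite author's own statement) =====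
-- stated objective: simpler
-- what changed: Replaced the two-pointer alternating mutation loop over the extras by a closed-form split (back gets ceil(extra/2), front gets floor(extra/2)) and a single comprehension over the positions.
import Mathlib
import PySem

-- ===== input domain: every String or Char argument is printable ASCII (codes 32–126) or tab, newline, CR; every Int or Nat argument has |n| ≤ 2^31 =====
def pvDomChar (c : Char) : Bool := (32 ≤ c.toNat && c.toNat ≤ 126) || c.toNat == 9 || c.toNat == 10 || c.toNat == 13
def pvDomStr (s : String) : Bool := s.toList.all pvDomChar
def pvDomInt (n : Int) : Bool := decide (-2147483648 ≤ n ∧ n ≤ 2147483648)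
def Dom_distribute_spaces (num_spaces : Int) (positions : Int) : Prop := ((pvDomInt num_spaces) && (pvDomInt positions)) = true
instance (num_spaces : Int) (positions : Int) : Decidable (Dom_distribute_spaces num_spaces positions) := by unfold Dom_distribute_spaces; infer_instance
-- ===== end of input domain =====

-- B replaces A's alternating two-pointer mutation loop by a closed-form split of the
-- extra spaces (back gets ceil(extra/2), front gets floor(extra/2)) and one map. (simpler)


-- ===== PORT A =====
-- 'position_map[i] = v' is ported with PySem.List.pySetD; both pointers are provably
-- in range on every reached iteration (0 ≤ extra < positions), so Python never raises.
def distribute_spaces (num_spaces : Int) (positions : Int) : List Int :=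
  if positions = 0 then [num_spaces]
  else
    let k := PySem.Int.floordiv num_spaces positions
    let position_map := (PySem.List.pyRange 0 positions 1).foldl (fun acc _ => acc ++ [k]) []
    let extra := PySem.Int.mod num_spaces positions
    let st := (PySem.List.pyRange 0 extra 1).foldl
      (fun (st : List Int × Int × Int × Bool) _ =>
        if st.2.2.2 then (PySem.List.pySetD st.1 st.2.1 (k+1), st.2.1 + 1, st.2.2.1, false)
        else (PySem.List.pySetD st.1 st.2.2.1 (k+1), st.2.1, st.2.2.1 - 1, true))
      (position_map, 0, positions - 1, false)
    st.1

-- ===== PORT B =====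
def distribute_spaces_alt (num_spaces : Int) (positions : Int) : List Int :=
  if positions = 0 then [num_spaces]
  else
    let k := PySem.Int.floordiv num_spaces positions
    let extra := PySem.Int.mod num_spaces positions
    let numFront := PySem.Int.floordiv extra 2
    let numBack := PySem.Int.floordiv (extra + 1) 2
    (PySem.List.pyRange 0 positions 1).map
      (fun i => if i < numFront ∨ positions - numBack ≤ i then k + 1 else k)

-- ===== PRECONDITION & SPEC =====
def Spec_distribute_spaces (num_spaces : Int) (positions : Int) (out : List Int) : Prop := out = distribute_spaces_alt num_spaces positions
instance (num_spaces : Int) (positions : Int) (out : List Int) : Decidable (Spec_distribute_spaces num_spaces positions out) := by unfold Spec_distribute_spaces; infer_instance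

-- ===== CLAIM (what is proved, stated in full; the proofs are below) =====
def Claim_equal_distribute_spaces : Prop := ∀ (num_spaces : Int) (positions : Int), Dom_distribute_spaces num_spaces positions → Spec_distribute_spaces num_spaces positions (distribute_spaces num_spaces positions)

-- ===== LEMMAS AND PROOFS =====

-- The list after j alternating stores: k+1 on the first j/2 and last (j+1)/2 slots.
def spreadList (k : Int) (p j : Nat) : List Int :=
  (List.range p).map (fun i => if i < j/2 ∨ p - (j+1)/2 ≤ i then k+1 else k)

lemma spreadList_zero (k : Int) (p : Nat) : spreadList k p 0 = List.replicate p k := by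
  apply List.ext_getElem
  · simp [spreadList]
  · intro i h1 h2
    simp only [spreadList, List.length_map, List.length_range] at h1
    simp only [spreadList, List.getElem_map, List.getElem_range, List.getElem_replicate]
    rw [if_neg (by omega)]

lemma set_back (k : Int) (p j : Nat) (hj : j % 2 = 0) (hjp : j < p) :
    (spreadList k p j).set (p - 1 - j/2) (k+1) = spreadList k p (j+1) := by
  apply List.ext_getElem
  · simp [spreadList]
  · intro i h1 h2
    simp only [spreadList, List.length_map, List.length_range] at h2 ⊢
    rw [List.getElem_set]
    simp only [List.getElem_map, List.getElem_range]
    split_ifs <;> omega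

lemma set_front (k : Int) (p j : Nat) (hj : j % 2 = 1) (hjp : j < p) :
    (spreadList k p j).set (j/2) (k+1) = spreadList k p (j+1) := by
  apply List.ext_getElem
  · simp [spreadList]
  · intro i h1 h2
    simp only [spreadList, List.length_map, List.length_range] at h2 ⊢
    rw [List.getElem_set]
    simp only [List.getElem_map, List.getElem_range]
    split_ifs <;> omega

-- The invariant of A's extra-distribution loop, by induction on the iteration count.
lemma loop_inv (k : Int) (p : Nat) (j : Nat) (hjp : j ≤ p) :
    (PySem.List.pyRange 0 (j : Int) 1).foldl
      (fun (st : List Int × Int × Int × Bool) _ =>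
        if st.2.2.2 then (PySem.List.pySetD st.1 st.2.1 (k+1), st.2.1 + 1, st.2.2.1, false)
        else (PySem.List.pySetD st.1 st.2.2.1 (k+1), st.2.1, st.2.2.1 - 1, true))
      (List.replicate p k, 0, (p : Int) - 1, false)
    = (spreadList k p j, ((j/2 : Nat) : Int), (p : Int) - 1 - (((j+1)/2 : Nat) : Int),
       decide (j % 2 = 1)) := by
  induction j with
  | zero =>
      rw [show ((0:Nat):Int) = 0 by norm_num, PySem.List.pyRange_one_eq_nil (by omega)]
      simp [spreadList_zero]
  | succ j ih =>
      have hj : j ≤ p := by omega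
      rw [show ((j+1 : Nat) : Int) = (j : Int) + 1 by push_cast; ring,
          PySem.List.pyRange_one_succ_right (by positivity), List.foldl_append, ih hj]
      simp only [List.foldl_cons, List.foldl_nil]
      rcases Nat.even_or_odd j with he | ho
      · have hj2 : j % 2 = 0 := Nat.even_iff.mp he
        have hflag : decide (j % 2 = 1) = false := by simp [hj2]
        have hidx : (p : Int) - 1 - (((j+1)/2 : Nat) : Int) = ((p - 1 - j/2 : Nat) : Int) := by
          push_cast; omega
        rw [hflag, hidx]
        simp only [Bool.false_eq_true, if_false]
        rw [PySem.List.pySetD_natCast, set_back k p j hj2 (by omega)]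
        have hf2 : (j+1) % 2 = 1 := by omega
        simp only [Prod.mk.injEq]
        refine ⟨trivial, by omega, by omega, by simp [hf2]⟩
      · have hj2 : j % 2 = 1 := Nat.odd_iff.mp ho
        have hflag : decide (j % 2 = 1) = true := by simp [hj2]
        rw [hflag]
        simp only [if_true]
        rw [PySem.List.pySetD_natCast, set_front k p j hj2 (by omega)]
        have hf2 : (j+1) % 2 = 0 := by omega
        simp only [Prod.mk.injEq]
        refine ⟨trivial, by omega, by omega, by simp [hf2]⟩

-- ===== VERDICT (by name: the statement is the Claim_ definition above) =====
theorem distribute_spaces_spec : Claim_equal_distribute_spaces := by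
  intro n positions _
  unfold Spec_distribute_spaces
  by_cases h0 : positions = 0
  · simp [distribute_spaces, distribute_spaces_alt, h0]
  simp only [distribute_spaces, distribute_spaces_alt, if_neg h0]
  rcases lt_or_gt_of_ne h0 with hneg | hpos
  · -- positions < 0: both loops are empty and both results are []
    have hextra := PySem.Int.mod_neg_bounds n hneg
    rw [PySem.List.pyRange_one_eq_nil (le_of_lt hneg),
        PySem.List.pyRange_one_eq_nil hextra.2]
    simp
  · -- positions > 0
    have he0 : 0 ≤ PySem.Int.mod n positions := PySem.Int.mod_nonneg n hpos
    have hep : PySem.Int.mod n positions < positions := PySem.Int.mod_lt n hpos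
    set k := PySem.Int.floordiv n positions with hk
    set e := PySem.Int.mod n positions with he
    set p : Nat := positions.toNat with hp
    have hpi : (p : Int) = positions := Int.toNat_of_nonneg (le_of_lt hpos)
    set m : Nat := e.toNat with hm
    have hmi : (m : Int) = e := Int.toNat_of_nonneg he0
    have hmp : m ≤ p := by omega
    -- the first loop builds replicate p k
    have hmap : (PySem.List.pyRange 0 positions 1).foldl (fun acc _ => acc ++ [k]) []
        = List.replicate p k := by
      rw [show (fun (acc : List Int) (_ : Int) => acc ++ [k])
            = (fun acc x => acc ++ [(fun _ => k) x]) from rfl,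
          PySem.List.foldl_append_singleton_eq_map]
      rw [List.eq_replicate_iff]
      constructor
      · rw [List.nil_append, List.length_map, PySem.List.length_pyRange_one]; omega
      · intro b hb; simp only [List.nil_append, List.mem_map] at hb; obtain ⟨_, _, rfl⟩ := hb; rfl
    rw [hmap, ← hmi, ← hpi, loop_inv k p m hmp]
    -- both sides are maps indexed over the same range
    rw [PySem.List.pyRange_one 0 ((p : Nat) : Int)]
    simp only [sub_zero, Int.toNat_natCast, spreadList]
    apply List.ext_getElem
    · simp
    · intro i h1 h2
      simp only [List.getElem_map, List.getElem_range, zero_add]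
      rw [show PySem.Int.floordiv ((m : Nat) : Int) 2 = ((m/2 : Nat) : Int) from
            PySem.Int.floordiv_natCast m 2,
          show PySem.Int.floordiv (((m : Nat) : Int) + 1) 2 = (((m+1)/2 : Nat) : Int) by
            exact_mod_cast PySem.Int.floordiv_natCast (m+1) 2]
      have hmp2 : (m+1)/2 ≤ p := by omega
      by_cases hc : i < m/2 ∨ p - (m+1)/2 ≤ i
      · rw [if_pos hc, if_pos (by push_cast; omega)]
      · rw [if_neg hc, if_neg (by push_cast; omega)]
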